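-- pv_equiv track=rewrite | github.com/pypi-data/pypi-mirror-391 | packages/sqldown/sqldown-0.1.0.tar.gz/sqldown-0.1.0/bin/import.py | validate_column_count
-- ===== SOURCE A (Python) =====
-- def validate_column_count(docs: list, max_columns: int) -> tuple[bool, int, dict]:
--     """Validate that total unique columns won't exceed SQLite limit.
--
--     Args:
--         docs: List of document dictionaries
--         max_columns: Maximum allowed columns
--
--     Returns:
--         Tuple of (is_valid, total_columns, column_breakdown)
--         where column_breakdown is a dict with counts by category
--     """
--     if not docs:
--         return True, 0, {}
--
--     # Collect all unique column names across all documents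
--     all_columns = set()
--     frontmatter_cols = set()
--     section_cols = set()
--     base_cols = {'_id', '_path', '_sections', 'title', 'body', 'lead', 'file_modified'}
--
--     for doc in docs:
--         for col in doc.keys():
--             all_columns.add(col)
--             if col.startswith('section_'):
--                 section_cols.add(col)
--             elif col not in base_cols:
--                 frontmatter_cols.add(col)
--
--     total = len(all_columns)
--     breakdown = {
--         'total': total,
--         'base': len(base_cols),
--         'frontmatter': len(frontmatter_cols),
--         'sections': len(section_cols)
--     }
--
--     is_valid = total <= max_columns
--     return is_valid, total, breakdown
-- ===== SOURCE B (Python) =====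
-- def validate_column_count(docs: list, max_columns: int) -> tuple[bool, int, dict]:
--     """Sort-then-scan rewrite: flatten all keys, sort them, and count each
--     category on run boundaries of the sorted stream (duplicates are adjacent
--     after sorting, so no hash sets are needed)."""
--     if not docs:
--         return True, 0, {}
--
--     base_cols = {'_id', '_path', '_sections', 'title', 'body', 'lead', 'file_modified'}
--
--     keys = sorted(k for doc in docs for k in doc)
--
--     total = 0
--     sections = 0
--     frontmatter = 0
--     prev = None
--     for k in keys:
--         if k != prev:
--             total += 1
--             if k.startswith('section_'):
--                 sections += 1
--             elif k not in base_cols: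
--                 frontmatter += 1
--             prev = k
--
--     breakdown = {
--         'total': total,
--         'base': len(base_cols),
--         'frontmatter': frontmatter,
--         'sections': sections
--     }
--     return total <= max_columns, total, breakdown
-- ===== Notes on version B (the rewrite author's own statement) =====
-- stated objective: alternative
-- what changed: A deduplicates and classifies with three hash sets maintained in one nested per-key loop; B flattens all keys, sorts them, and counts categories in a single linear scan at run boundaries of the sorted stream (sort-based dedup, no sets at all).
import Mathlib
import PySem

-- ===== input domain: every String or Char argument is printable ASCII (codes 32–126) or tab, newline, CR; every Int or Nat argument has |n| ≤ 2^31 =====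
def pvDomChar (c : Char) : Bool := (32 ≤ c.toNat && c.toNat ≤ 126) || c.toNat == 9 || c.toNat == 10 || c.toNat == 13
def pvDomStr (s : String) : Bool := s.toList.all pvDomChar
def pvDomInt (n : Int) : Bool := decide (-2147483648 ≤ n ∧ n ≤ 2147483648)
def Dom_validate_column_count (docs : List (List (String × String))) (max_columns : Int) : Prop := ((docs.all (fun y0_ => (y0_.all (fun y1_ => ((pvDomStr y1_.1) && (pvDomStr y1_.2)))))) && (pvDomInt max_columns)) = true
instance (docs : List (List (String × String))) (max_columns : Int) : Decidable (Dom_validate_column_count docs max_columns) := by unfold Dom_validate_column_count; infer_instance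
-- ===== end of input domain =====

-- B replaces A's three hash sets with a flatten-sort-scan pass that counts categories
-- at run boundaries of the sorted key stream (objective: alternative algorithm, sort-based dedup).


def pvBaseCols : PySem.Set String :=
  PySem.Set.ofList ["_id", "_path", "_sections", "title", "body", "lead", "file_modified"]

-- ===== PORT A =====
def validate_column_count (docs : List (List (String × String))) (max_columns : Int) : Bool × Int × (List (String × Int)) :=
  if docs = [] then (true, 0, [])
  else
    let st :=
      docs.foldl (fun (acc : PySem.Set String × PySem.Set String × PySem.Set String) doc =>
        doc.foldl (fun acc p =>
          let col := p.1
          let all := PySem.Set.add acc.1 col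
          if PySem.Str.startswith col "section_" then (all, acc.2.1, PySem.Set.add acc.2.2 col)
          else if PySem.Set.contains pvBaseCols col then (all, acc.2.1, acc.2.2)
          else (all, PySem.Set.add acc.2.1 col, acc.2.2)) acc)
        (PySem.Set.empty, PySem.Set.empty, PySem.Set.empty)
    let total : Int := (st.1.length : Int)
    let breakdown : List (String × Int) :=
      [("total", total), ("base", (pvBaseCols.length : Int)),
       ("frontmatter", (st.2.1.length : Int)), ("sections", (st.2.2.length : Int))]
    (decide (total ≤ max_columns), total, breakdown)

-- ===== PORT B =====
-- one iteration of Source B's for-loop: state (total, sections, frontmatter, prev)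
def pvStepB (acc : Int × Int × Int × Option String) (k : String) : Int × Int × Int × Option String :=
  if acc.2.2.2 ≠ some k then
    let total := acc.1 + 1
    if PySem.Str.startswith k "section_" then (total, acc.2.1 + 1, acc.2.2.1, some k)
    else if PySem.Set.contains pvBaseCols k then (total, acc.2.1, acc.2.2.1, some k)
    else (total, acc.2.1, acc.2.2.1 + 1, some k)
  else acc

def validate_column_count_alt (docs : List (List (String × String))) (max_columns : Int) : Bool × Int × (List (String × Int)) :=
  if docs = [] then (true, 0, [])
  else
    let keys := PySem.List.sorted (docs.flatMap (fun doc => doc.map Prod.fst)) (fun x => x) false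
    let st := keys.foldl pvStepB (0, 0, 0, none)
    let breakdown : List (String × Int) :=
      [("total", st.1), ("base", (pvBaseCols.length : Int)),
       ("frontmatter", st.2.2.1), ("sections", st.2.1)]
    (decide (st.1 ≤ max_columns), st.1, breakdown)

-- ===== PRECONDITION & SPEC =====
def Spec_validate_column_count (docs : List (List (String × String))) (max_columns : Int) (out : Bool × Int × (List (String × Int))) : Prop := out = validate_column_count_alt docs max_columns
instance (docs : List (List (String × String))) (max_columns : Int) (out : Bool × Int × (List (String × Int))) : Decidable (Spec_validate_column_count docs max_columns out) := by unfold Spec_validate_column_count; infer_instance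

-- ===== CLAIM (what is proved, stated in full; the proofs are below) =====
def Claim_equal_validate_column_count : Prop := ∀ (docs : List (List (String × String))) (max_columns : Int), Dom_validate_column_count docs max_columns → Spec_validate_column_count docs max_columns (validate_column_count docs max_columns)

-- ===== LEMMAS AND PROOFS =====

def pvPS (c : String) : Bool := PySem.Str.startswith c "section_"
def pvPF (c : String) : Bool := !pvPS c && !PySem.Set.contains pvBaseCols c

-- ---- A side: the fused loop maintains (S, S.filter pvPF, S.filter pvPS) ----
def pvStepA (acc : PySem.Set String × PySem.Set String × PySem.Set String) (col : String) :
    PySem.Set String × PySem.Set String × PySem.Set String :=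
  let all := PySem.Set.add acc.1 col
  if PySem.Str.startswith col "section_" then (all, acc.2.1, PySem.Set.add acc.2.2 col)
  else if PySem.Set.contains pvBaseCols col then (all, acc.2.1, acc.2.2)
  else (all, PySem.Set.add acc.2.1 col, acc.2.2)

theorem pv_add_filter (s : PySem.Set String) (q : String → Bool) (c : String) :
    (PySem.Set.add s c).filter q = if q c then PySem.Set.add (s.filter q) c else s.filter q := by
  by_cases hm : c ∈ s
  · rw [PySem.Set.add_of_mem hm]
    by_cases hq : q c = true
    · have hmf : c ∈ s.filter q := List.mem_filter.mpr ⟨hm, hq⟩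
      rw [if_pos hq, PySem.Set.add_of_mem hmf]
    · simp [hq]
  · rw [PySem.Set.add_of_not_mem hm, List.filter_append]
    by_cases hq : q c = true
    · have hnf : c ∉ s.filter q := fun hc => hm (List.mem_filter.mp hc).1
      rw [if_pos hq, PySem.Set.add_of_not_mem hnf]
      simp [hq]
    · simp [hq]

theorem pv_step_inv (s : PySem.Set String) (c : String) :
    pvStepA (s, s.filter pvPF, s.filter pvPS) c
      = (PySem.Set.add s c, (PySem.Set.add s c).filter pvPF, (PySem.Set.add s c).filter pvPS) := by
  unfold pvStepA
  rw [pv_add_filter s pvPF c, pv_add_filter s pvPS c]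
  by_cases hs : PySem.Str.startswith c "section_" = true
  · have hps : pvPS c = true := hs
    have hpf : pvPF c = false := by simp [pvPF, hps]
    rw [if_pos hs]
    simp only [hps, hpf, if_true, Bool.false_eq_true, if_false]
  · have hps : pvPS c = false := by simpa [pvPS] using hs
    rw [if_neg hs]
    by_cases hb : PySem.Set.contains pvBaseCols c = true
    · have hpf : pvPF c = false := by
        simp only [pvPF, Bool.and_eq_false_iff, Bool.not_eq_false']
        right; exact hb
      rw [if_pos hb]
      simp only [hps, hpf, Bool.false_eq_true, if_false]
    · have hpf : pvPF c = true := by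
        simp only [pvPF, Bool.and_eq_true, Bool.not_eq_true']
        exact ⟨hps, Bool.not_eq_true _ ▸ (Bool.eq_false_iff.mpr hb)⟩
      rw [if_neg hb]
      simp only [hps, hpf, if_true, Bool.false_eq_true, if_false]

theorem pv_inner (cols : List String) (s : PySem.Set String) :
    cols.foldl pvStepA (s, s.filter pvPF, s.filter pvPS)
      = (PySem.Set.update s cols, (PySem.Set.update s cols).filter pvPF,
         (PySem.Set.update s cols).filter pvPS) := by
  induction cols generalizing s with
  | nil => simp [PySem.Set.update]
  | cons c cs ih =>
      rw [List.foldl_cons, pv_step_inv s c, ih (PySem.Set.add s c),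
        PySem.Set.update_cons]

theorem pv_outer (docs : List (List (String × String))) (s : PySem.Set String) :
    docs.foldl (fun acc doc => doc.foldl (fun a (p : String × String) => pvStepA a p.1) acc)
        (s, s.filter pvPF, s.filter pvPS)
      = (docs.foldl (fun t doc => PySem.Set.update t (doc.map Prod.fst)) s,
         (docs.foldl (fun t doc => PySem.Set.update t (doc.map Prod.fst)) s).filter pvPF,
         (docs.foldl (fun t doc => PySem.Set.update t (doc.map Prod.fst)) s).filter pvPS) := by
  induction docs generalizing s with
  | nil => rfl
  | cons doc rest ih =>
      rw [List.foldl_cons, List.foldl_cons]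
      have hmap : doc.foldl (fun a (p : String × String) => pvStepA a p.1)
          (s, s.filter pvPF, s.filter pvPS)
          = (doc.map Prod.fst).foldl pvStepA (s, s.filter pvPF, s.filter pvPS) := by
        rw [List.foldl_map]
      rw [hmap, pv_inner (doc.map Prod.fst) s,
        ih (PySem.Set.update s (doc.map Prod.fst))]

theorem pv_update_ofList' (l xs : List String) :
    PySem.Set.update (PySem.Set.ofList l) xs = PySem.Set.ofList (l ++ xs) := by
  rw [PySem.Set.ofList_eq_foldl, PySem.Set.ofList_eq_foldl, List.foldl_append]
  rfl

theorem pv_fold_update (docs : List (List (String × String))) (l : List String) :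
    docs.foldl (fun t doc => PySem.Set.update t (doc.map Prod.fst)) (PySem.Set.ofList l)
      = PySem.Set.ofList (l ++ docs.flatMap (fun d => d.map Prod.fst)) := by
  induction docs generalizing l with
  | nil => simp
  | cons d r ih =>
      rw [List.foldl_cons, pv_update_ofList', ih, List.flatMap_cons, List.append_assoc]

-- ---- B side: the run-boundary scan counts over the run-first subsequence ----
def pvRun : Option String → List String → List String
  | _, [] => []
  | prev, k :: ks => if prev = some k then pvRun prev ks else k :: pvRun (some k) ks

def pvLast (prev : Option String) (L : List String) : Option String :=
  L.foldl (fun _ k => some k) prev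

theorem pv_fold_run (L : List String) (prev : Option String) (t s f : Int) :
    L.foldl pvStepB (t, s, f, prev)
      = (t + ((pvRun prev L).length : Int),
         s + (((pvRun prev L).countP pvPS : Nat) : Int),
         f + (((pvRun prev L).countP pvPF : Nat) : Int),
         pvLast prev L) := by
  induction L generalizing prev t s f with
  | nil => simp [pvRun, pvLast]
  | cons k ks ih =>
      rw [List.foldl_cons]
      by_cases hp : prev = some k
      · have hstep : pvStepB (t, s, f, prev) k = (t, s, f, prev) := by
          simp [pvStepB, hp]
        rw [hstep, ih prev t s f]
        simp [pvRun, hp, pvLast, List.foldl_cons]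
      · have hne : prev ≠ some k := hp
        have hrun : pvRun prev (k :: ks) = k :: pvRun (some k) ks := by
          simp [pvRun, hp]
        by_cases hs : PySem.Str.startswith k "section_" = true
        · have hstep : pvStepB (t, s, f, prev) k = (t + 1, s + 1, f, some k) := by
            simp only [pvStepB]
            rw [if_pos hne, if_pos hs]
          rw [hstep, ih (some k)]
          have hps : pvPS k = true := hs
          have hpf : pvPF k = false := by simp [pvPF, hps]
          simp [hrun, hps, hpf, pvLast, List.foldl_cons]
          constructor <;> ring
        · by_cases hb : PySem.Set.contains pvBaseCols k = true
          · have hstep : pvStepB (t, s, f, prev) k = (t + 1, s, f, some k) := by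
              simp only [pvStepB]
              rw [if_pos hne, if_neg hs, if_pos hb]
            rw [hstep, ih (some k)]
            have hps : pvPS k = false := by simpa [pvPS] using hs
            have hpf : pvPF k = false := by
              simp only [pvPF, hps, Bool.not_false, Bool.true_and, Bool.not_eq_false']
              exact hb
            simp [hrun, hps, hpf, pvLast, List.foldl_cons]
            ring
          · have hstep : pvStepB (t, s, f, prev) k = (t + 1, s, f + 1, some k) := by
              simp only [pvStepB]
              rw [if_pos hne, if_neg hs, if_neg hb]
            rw [hstep, ih (some k)]
            have hps : pvPS k = false := by simpa [pvPS] using hs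
            have hpf : pvPF k = true := by
              simp only [pvPF, hps, Bool.not_false, Bool.true_and, Bool.not_eq_true']
              exact eq_false_of_ne_true hb
            simp [hrun, hps, hpf, pvLast, List.foldl_cons]
            constructor <;> ring

theorem pv_run_mem_nodup (L : List String) (hL : L.Pairwise (· ≤ ·)) :
    ∀ (prev : Option String), (∀ p, prev = some p → ∀ x ∈ L, p ≤ x) →
      (pvRun prev L).Nodup ∧ ∀ x, x ∈ pvRun prev L ↔ x ∈ L ∧ prev ≠ some x := by
  induction L with
  | nil => intro prev _; simp [pvRun]
  | cons k ks ih =>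
      intro prev hprev
      have hk : ∀ x ∈ ks, k ≤ x := fun x hx => (List.pairwise_cons.mp hL).1 x hx
      have hks : ks.Pairwise (· ≤ ·) := (List.pairwise_cons.mp hL).2
      by_cases hp : prev = some k
      · have hIH := ih hks prev (by
          intro p hpp x hx
          subst hp
          cases hpp
          exact hk x hx)
        refine ⟨by simpa [pvRun, hp] using hIH.1, ?_⟩
        intro x
        rw [show pvRun prev (k :: ks) = pvRun prev ks by simp [pvRun, hp]]
        rw [hIH.2 x]
        constructor
        · rintro ⟨hx, hnx⟩; exact ⟨List.mem_cons_of_mem _ hx, hnx⟩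
        · rintro ⟨hx, hnx⟩
          rcases List.mem_cons.mp hx with h | h
          · exact absurd (h ▸ hp) hnx
          · exact ⟨h, hnx⟩
      · have hIH := ih hks (some k) (by
          intro p hpp x hx
          cases hpp
          exact hk x hx)
        have hrun : pvRun prev (k :: ks) = k :: pvRun (some k) ks := by simp [pvRun, hp]
        constructor
        · rw [hrun]
          refine List.nodup_cons.mpr ⟨?_, hIH.1⟩
          intro hmem
          exact ((hIH.2 k).mp hmem).2 rfl
        · intro x
          rw [hrun, List.mem_cons, hIH.2 x]
          constructor
          · rintro (rfl | ⟨hx, hnx⟩)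
            · exact ⟨List.mem_cons_self, fun h => hp h⟩
            · refine ⟨List.mem_cons_of_mem _ hx, ?_⟩
              intro hpx
              have hxk : x ≤ k := hprev x hpx k List.mem_cons_self
              have hkx : k ≤ x := hk x hx
              exact hnx (congrArg some (le_antisymm hxk hkx)).symm
          · rintro ⟨hx, hnx⟩
            rcases List.mem_cons.mp hx with rfl | h
            · exact Or.inl rfl
            · by_cases hxk : x = k
              · exact Or.inl hxk
              · exact Or.inr ⟨h, fun hsome => hxk (Option.some.inj hsome).symm⟩

-- ===== VERDICT (by name: the statement is the Claim_ definition above) =====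
theorem validate_column_count_spec : Claim_equal_validate_column_count := by
  intro docs max_columns _
  unfold Spec_validate_column_count validate_column_count validate_column_count_alt
  by_cases hd : docs = []
  · simp [hd]
  · rw [if_neg hd, if_neg hd]
    -- name the flattened key list and the sorted stream
    set keys := docs.flatMap (fun d => d.map Prod.fst) with hkeys
    set L := PySem.List.sorted keys (fun x => x) false with hL
    set S := PySem.Set.ofList keys with hS
    -- A's fused loop computes (S, S.filter pvPF, S.filter pvPS)
    have hstepA : (fun (acc : PySem.Set String × PySem.Set String × PySem.Set String)
        (p : String × String) => pvStepA acc p.1) = fun acc p =>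
          let col := p.1
          let all := PySem.Set.add acc.1 col
          if PySem.Str.startswith col "section_" then (all, acc.2.1, PySem.Set.add acc.2.2 col)
          else if PySem.Set.contains pvBaseCols col then (all, acc.2.1, acc.2.2)
          else (all, PySem.Set.add acc.2.1 col, acc.2.2) := rfl
    have h0 : (PySem.Set.empty, PySem.Set.empty, PySem.Set.empty) =
        ((PySem.Set.empty : PySem.Set String),
         (PySem.Set.empty : PySem.Set String).filter pvPF,
         (PySem.Set.empty : PySem.Set String).filter pvPS) := rfl
    have hA : docs.foldl (fun t doc => PySem.Set.update t (doc.map Prod.fst))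
        (PySem.Set.empty : PySem.Set String) = S := by
      have := pv_fold_update docs []
      simpa [PySem.Set.empty, hkeys] using this
    -- B's scan counts over R := pvRun none L
    have hRB := pv_fold_run L none 0 0 0
    -- R is nodup and has the same members as S
    have hpair : L.Pairwise (· ≤ ·) := by
      have := PySem.List.sorted_pairwise (xs := keys) (key := fun x => x)
      simpa using this
    have hR := pv_run_mem_nodup L hpair none (by intro p hpp; cases hpp)
    have hmemRS : ∀ x, x ∈ pvRun none L ↔ x ∈ S := by
      intro x
      rw [(hR.2 x)]
      simp [hL, PySem.List.mem_sorted, hS, PySem.Set.mem_ofList]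
    have hperm : (pvRun none L).Perm S :=
      (List.perm_ext_iff_of_nodup hR.1 (PySem.Set.nodup_ofList keys)).mpr hmemRS
    have hlen : (pvRun none L).length = S.length := hperm.length_eq
    have hcS : (pvRun none L).countP pvPS = (S.filter pvPS).length := by
      rw [hperm.countP_eq, List.countP_eq_length_filter]
    have hcF : (pvRun none L).countP pvPF = (S.filter pvPF).length := by
      rw [hperm.countP_eq, List.countP_eq_length_filter]
    simp only [← hstepA, h0, pv_outer docs PySem.Set.empty, hA, hRB, hlen, hcS, hcF,
      zero_add]
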